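-- pv_equiv track=rewrite | github.com/Josrodjr/IA_searches | modules/starlib.py | highest_value
-- ===== SOURCE A (Python) =====
-- def highest_value(cs):
--     highest_value = 0
--     x0 = 0
--     y0 = 0
--     for y in range(len(cs)):
--         for x in range(len(cs)):
--             if (highest_value < cs[y][x]):
--                 highest_value = cs[y][x]
--                 x0 = x
--                 y0 = y
--     return highest_value, x0, y0
-- ===== SOURCE B (Python) =====
-- def highest_value(cs):
--     n = len(cs)
--     # pass 1: find the maximum value, floored at 0
--     mx = 0
--     for y in range(n):
--         for x in range(n):
--             if cs[y][x] > mx: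
--                 mx = cs[y][x]
--     # pass 2: locate the first occurrence (row-major); if mx is 0 no cell beat the floor
--     if mx > 0:
--         for y in range(n):
--             for x in range(n):
--                 if cs[y][x] == mx:
--                     return mx, x, y
--     return mx, 0, 0
-- ===== Notes on version B (the rewrite author's own statement) =====
-- stated objective: alternative
-- what changed: B separates value-finding from position-finding: a first pass computes the maximum (floored at 0) maintaining only the scalar max, then a second pass returns early at the first cell equal to it, instead of A's single loop updating (value, x, y) together.
import Mathlib
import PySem

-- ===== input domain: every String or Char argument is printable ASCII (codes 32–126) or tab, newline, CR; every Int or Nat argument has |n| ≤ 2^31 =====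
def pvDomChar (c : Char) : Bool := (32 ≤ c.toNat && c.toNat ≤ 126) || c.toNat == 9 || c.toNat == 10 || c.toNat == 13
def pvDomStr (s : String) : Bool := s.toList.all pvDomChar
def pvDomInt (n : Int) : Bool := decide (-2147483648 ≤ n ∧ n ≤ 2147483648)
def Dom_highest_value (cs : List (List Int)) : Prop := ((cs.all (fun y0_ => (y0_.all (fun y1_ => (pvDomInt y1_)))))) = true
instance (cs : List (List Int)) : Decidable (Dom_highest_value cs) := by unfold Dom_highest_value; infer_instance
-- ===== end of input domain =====

-- B does the same work in two separate row-major passes (max pass, then first-match search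
-- with early return) instead of A's single combined update loop; same cost, plainer decomposition.

-- cs[y][x] (both ports index inside Pre_'s bounds; 0-default never observed under Pre_)
def hvGet (cs : List (List Int)) (y x : Int) : Int :=
  PySem.List.pyGetD (PySem.List.pyGetD cs y []) x 0

-- ===== PORT A =====
def highest_value (cs : List (List Int)) : Int × Int × Int :=
  (PySem.List.pyRange 0 cs.length 1).foldl (fun st y =>
    (PySem.List.pyRange 0 cs.length 1).foldl (fun st x =>
      if st.1 < hvGet cs y x then (hvGet cs y x, x, y) else st) st) (0, 0, 0)

-- ===== PORT B =====
-- row-major list of (y, x) index pairs, for the early-return search loop of B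
def hvPairs (n : Int) : List (Int × Int) :=
  (PySem.List.pyRange 0 n 1).flatMap (fun y =>
    (PySem.List.pyRange 0 n 1).map (fun x => (y, x)))

def hvMax (cs : List (List Int)) : Int :=
  (PySem.List.pyRange 0 cs.length 1).foldl (fun m y =>
    (PySem.List.pyRange 0 cs.length 1).foldl (fun m x =>
      if m < hvGet cs y x then hvGet cs y x else m) m) 0

def highest_value_alt (cs : List (List Int)) : Int × Int × Int :=
  if 0 < hvMax cs then
    match (hvPairs cs.length).find? (fun p => hvGet cs p.1 p.2 == hvMax cs) with
    | some p => (hvMax cs, p.2, p.1)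
    | none => (hvMax cs, 0, 0)
  else (hvMax cs, 0, 0)

-- ===== PRECONDITION & SPEC =====
-- Pre_ excludes exactly the inputs where Python A raises IndexError: rows shorter than len(cs)
-- (both loops run x over range(len(cs))).
def Pre_highest_value (cs : List (List Int)) : Prop :=
  ∀ row ∈ cs, cs.length ≤ row.length
instance (cs : List (List Int)) : Decidable (Pre_highest_value cs) := by
  unfold Pre_highest_value; infer_instance
def pvWitness_highest_value : List (List Int) := [[1, 2], [3, 4]]

def Spec_highest_value (cs : List (List Int)) (out : Int × Int × Int) : Prop := out = highest_value_alt cs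
instance (cs : List (List Int)) (out : Int × Int × Int) : Decidable (Spec_highest_value cs out) := by unfold Spec_highest_value; infer_instance

-- ===== CLAIM (what is proved, stated in full; the proofs are below) =====
def Claim_equal_highest_value : Prop := ∀ (cs : List (List Int)), Dom_highest_value cs → Pre_highest_value cs → Spec_highest_value cs (highest_value cs)

-- ===== LEMMAS AND PROOFS =====

-- A's combined update step, over a flattened pair list
def foldA (g : Int → Int → Int) (l : List (Int × Int)) (st : Int × Int × Int) : Int × Int × Int :=
  l.foldl (fun st p => if st.1 < g p.1 p.2 then (g p.1 p.2, p.2, p.1) else st) st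

-- B's max-only step
def foldM (g : Int → Int → Int) (l : List (Int × Int)) (m : Int) : Int :=
  l.foldl (fun m p => if m < g p.1 p.2 then g p.1 p.2 else m) m

theorem foldM_ge (g : Int → Int → Int) (l : List (Int × Int)) (m : Int) :
    m ≤ foldM g l m := by
  induction l generalizing m with
  | nil => simp [foldM]
  | cons p t ih =>
    simp only [foldM, List.foldl_cons]
    refine le_trans ?_ (ih _)
    split <;> omega

theorem find_none_foldM (g : Int → Int → Int) (l : List (Int × Int)) (m : Int)
    (h : l.find? (fun p => g p.1 p.2 == foldM g l m) = none) : foldM g l m = m := by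
  induction l generalizing m with
  | nil => rfl
  | cons p t ih =>
    simp only [List.find?_cons] at h
    split at h
    · exact absurd h (by simp)
    · rename_i hhead
      simp only [foldM, List.foldl_cons] at *
      have heq := ih (if m < g p.1 p.2 then g p.1 p.2 else m) h
      rw [heq] at hhead ⊢
      split at hhead
      · simp at hhead
      · rename_i hc; rw [if_neg hc]

theorem foldA_cons (g : Int → Int → Int) (p : Int × Int) (t : List (Int × Int)) (st : Int × Int × Int) :
    foldA g (p :: t) st = foldA g t (if st.1 < g p.1 p.2 then (g p.1 p.2, p.2, p.1) else st) := rfl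

theorem foldM_cons (g : Int → Int → Int) (p : Int × Int) (t : List (Int × Int)) (m : Int) :
    foldM g (p :: t) m = foldM g t (if m < g p.1 p.2 then g p.1 p.2 else m) := rfl

theorem foldA_eq (g : Int → Int → Int) (l : List (Int × Int)) (m x y : Int) :
    foldA g l (m, x, y) =
      if foldM g l m = m then (m, x, y)
      else ((l.find? (fun p => g p.1 p.2 == foldM g l m)).map
              (fun p => (foldM g l m, p.2, p.1))).getD (foldM g l m, x, y) := by
  induction l generalizing m x y with
  | nil => simp [foldA, foldM]
  | cons p t ih =>
    rw [foldA_cons, foldM_cons]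
    by_cases hm : m < g p.1 p.2
    · rw [if_pos hm, if_pos hm, ih]
      have hgeV := foldM_ge g t (g p.1 p.2)
      have hMne : foldM g t (g p.1 p.2) ≠ m := by omega
      rw [if_neg hMne]
      by_cases hv : foldM g t (g p.1 p.2) = g p.1 p.2
      · rw [if_pos hv, List.find?_cons_of_pos (by simp [hv]), hv]; rfl
      · rw [if_neg hv, List.find?_cons_of_neg (by simpa using Ne.symm hv)]
        cases hfind : t.find? (fun q => g q.1 q.2 == foldM g t (g p.1 p.2)) with
        | none => exact absurd (find_none_foldM g t _ hfind) hv
        | some q => simp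
    · rw [if_neg hm, if_neg hm, ih]
      by_cases hM : foldM g t m = m
      · rw [if_pos hM, if_pos hM]
      · rw [if_neg hM, if_neg hM]
        have hge := foldM_ge g t m
        have : ¬ (g p.1 p.2 == foldM g t m) = true := by
          simp only [beq_iff_eq]; omega
        rw [List.find?_cons_of_neg (a := p) (l := t) this]

-- the nested range folds are the folds over the flattened pair list
theorem nested_foldA (cs : List (List Int)) :
    highest_value cs = foldA (hvGet cs) (hvPairs cs.length) (0, 0, 0) := by
  simp [highest_value, foldA, hvPairs, List.foldl_flatMap, List.foldl_map]

theorem nested_foldM (cs : List (List Int)) :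
    hvMax cs = foldM (hvGet cs) (hvPairs cs.length) 0 := by
  simp [hvMax, foldM, hvPairs, List.foldl_flatMap, List.foldl_map]

-- ===== VERDICT (by name: the statement is the Claim_ definition above) =====
theorem highest_value_spec : Claim_equal_highest_value := by
  intro cs _ _
  unfold Spec_highest_value
  rw [nested_foldA]
  show foldA (hvGet cs) (hvPairs cs.length) (0, 0, 0) = highest_value_alt cs
  unfold highest_value_alt
  rw [nested_foldM]
  set g := hvGet cs
  set l := hvPairs (cs.length : Int)
  rw [foldA_eq]
  by_cases hM : foldM g l 0 = 0
  · rw [if_pos hM]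
    simp [hM]
  · have hpos : (0 : Int) < foldM g l 0 := by have := foldM_ge g l 0; omega
    rw [if_neg hM]
    simp only [hpos, if_true]
    cases hfind : l.find? (fun p => g p.1 p.2 == foldM g l 0) with
    | none => exact absurd (find_none_foldM g l 0 hfind) hM
    | some q => simp
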